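-- pv_equiv track=rewrite | github.com/roman416/tabrix | app.py | normalize_header_row
-- ===== SOURCE A (Python) =====
-- from typing import Any
--
-- def normalize_header_row(values: tuple[Any, ...] | list[Any] | None) -> list[str]:
--     if not values:
--         return []
--     headers: list[str] = []
--     seen: dict[str, int] = {}
--     for index, value in enumerate(values, start=1):
--         base = str(value).strip() if value is not None else ''
--         if not base:
--             base = f'column_{index}'
--         count = seen.get(base, 0)
--         seen[base] = count + 1
--         headers.append(base if count == 0 else f'{base}_{count + 1}')
--     return headers
-- ===== SOURCE B (Python) =====
-- def normalize_header_row(values):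
--     if not values:
--         return []
--     bases = []
--     for index, value in enumerate(values, start=1):
--         base = str(value).strip() if value is not None else ''
--         bases.append(base if base else f'column_{index}')
--     groups = {}
--     for i, base in enumerate(bases):
--         groups.setdefault(base, []).append(i)
--     out = [''] * len(bases)
--     for base, idxs in groups.items():
--         out[idxs[0]] = base
--         for j, i in enumerate(idxs[1:], start=2):
--             out[i] = f'{base}_{j}'
--     return out
-- ===== Notes on version B (the rewrite author's own statement) =====
-- stated objective: alternative
-- what changed: Replaces A's single streaming loop with a running seen-count dict by a group-by algorithm: normalize bases, bucket all positions of each base into groups dict once, then fill a preallocated output array per group out of order (first occurrence gets the base, the k-th gets base_k), so no occurrence counter is ever maintained or consulted during emission.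
import Mathlib
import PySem

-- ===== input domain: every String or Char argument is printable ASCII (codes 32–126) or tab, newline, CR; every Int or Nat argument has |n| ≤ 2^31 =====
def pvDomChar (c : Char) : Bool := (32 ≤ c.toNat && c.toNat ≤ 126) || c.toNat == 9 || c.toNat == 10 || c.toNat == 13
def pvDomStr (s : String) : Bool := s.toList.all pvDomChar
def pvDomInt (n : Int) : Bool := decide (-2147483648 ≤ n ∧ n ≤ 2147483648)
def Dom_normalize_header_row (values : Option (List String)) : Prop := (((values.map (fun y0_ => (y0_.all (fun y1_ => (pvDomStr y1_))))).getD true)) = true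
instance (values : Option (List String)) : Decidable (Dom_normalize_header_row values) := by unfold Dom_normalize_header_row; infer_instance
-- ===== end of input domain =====

-- B replaces A's streaming loop with its running seen-count dict by a group-by algorithm:
-- normalize the bases, bucket the positions of each base into a groups dict, then fill a
-- preallocated output array per group out of order (alternative decomposition, same cost).

-- ===== PORT A =====
-- base = str(value).strip() if value is not None else ''; if not base: base = f'column_{index}'
-- (elements are strings here, so `str(value)` = value and the None branch is dead)
def nhrBase (v : String) (idx : Int) : String :=
  let b := PySem.Str.strip v
  if b = "" then "column_" ++ PySem.Int.toStr idx else b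

-- the for-loop of A: index counter, running seen dict, headers accumulated by cons
def nhrLoopA : List String → Int → PySem.Dict String Int → List String
  | [], _, _ => []
  | v :: rest, idx, seen =>
    let base := nhrBase v idx
    let count := seen.getD base 0
    (if count = 0 then base else base ++ "_" ++ PySem.Int.toStr (count + 1)) ::
      nhrLoopA rest (idx + 1) (seen.insert base (count + 1))

def normalize_header_row (values : Option (List String)) : List String :=
  match values with
  | none => []
  | some vs => if vs = [] then [] else nhrLoopA vs 1 PySem.Dict.empty

-- ===== PORT B =====
-- first loop of Source B: the list `bases`
def nhrBases : List String → Int → List String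
  | [], _ => []
  | v :: rest, idx => nhrBase v idx :: nhrBases rest (idx + 1)

-- second loop of Source B: groups.setdefault(base, []).append(i)
def nhrGroups (bases : List String) : PySem.Dict String (List Nat) :=
  bases.zipIdx.foldl (fun d p => d.modify p.1 [] (· ++ [p.2])) PySem.Dict.empty

-- body of the third loop of Source B: out[idxs[0]] = base; out[i] = f'{base}_{j}' for later i
-- ([] case is unreachable: every group is nonempty)
def nhrFill (base : String) (out : List String) (idxs : List Nat) : List String :=
  match idxs with
  | [] => out
  | i0 :: rest =>
      (rest.zipIdx 2).foldl
        (fun o p => o.set p.1 (base ++ "_" ++ PySem.Int.toStr (p.2 : Int)))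
        (out.set i0 base)

def normalize_header_row_alt (values : Option (List String)) : List String :=
  match values with
  | none => []
  | some vs =>
    if vs = [] then [] else
      let bases := nhrBases vs 1
      let groups := nhrGroups bases
      groups.items.foldl (fun out p => nhrFill p.1 out p.2) (List.replicate bases.length "")

-- ===== PRECONDITION & SPEC =====
def Spec_normalize_header_row (values : Option (List String)) (out : List String) : Prop := out = normalize_header_row_alt values
instance (values : Option (List String)) (out : List String) : Decidable (Spec_normalize_header_row values out) := by unfold Spec_normalize_header_row; infer_instance

-- ===== CLAIM =====
def Claim_equal_normalize_header_row : Prop := ∀ (values : Option (List String)), Dom_normalize_header_row values → Spec_normalize_header_row values (normalize_header_row values)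

-- ===== LEMMAS AND PROOFS =====

-- the name of column i, read off bases alone (prefix-count characterisation)
def nhrName (bases : List String) (i : Nat) : String :=
  match bases[i]? with
  | none => ""
  | some b =>
    let k := (bases.take i).count b
    if k = 0 then b else b ++ "_" ++ PySem.Int.toStr ((k : Int) + 1)

-- reference form shared by both proofs
def nhrRef : List String → List String → List String
  | _, [] => []
  | pre, b :: rest =>
    let k := pre.count b
    (if k = 0 then b else b ++ "_" ++ PySem.Int.toStr ((k : Int) + 1)) :: nhrRef (pre ++ [b]) rest

lemma nhrLoopA_eq_ref (vs : List String) (idx : Int) (pre : List String)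
    (seen : PySem.Dict String Int)
    (h : ∀ b, seen.getD b 0 = (pre.count b : Int)) :
    nhrLoopA vs idx seen = nhrRef pre (nhrBases vs idx) := by
  induction vs generalizing idx pre seen with
  | nil => simp [nhrLoopA, nhrBases, nhrRef]
  | cons v rest ih =>
    simp only [nhrLoopA, nhrBases, nhrRef, h (nhrBase v idx)]
    congr 1
    · norm_cast
    · apply ih
      intro b
      rw [PySem.Dict.getD_insert]
      by_cases hb : b = nhrBase v idx
      · subst hb; simp [List.count_append]
      · simp [hb, h b, List.count_append, Ne.symm hb]

lemma nhrRef_length (pre rest : List String) : (nhrRef pre rest).length = rest.length := by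
  induction rest generalizing pre with
  | nil => rfl
  | cons b rest ih => simp [nhrRef, ih]

lemma nhrRef_get (pre rest : List String) (q : Nat) (hq : q < rest.length) :
    (nhrRef pre rest)[q]? = some (nhrName (pre ++ rest) (pre.length + q)) := by
  induction rest generalizing pre q with
  | nil => simp at hq
  | cons b rest ih =>
    cases q with
    | zero =>
      simp only [nhrRef, nhrName, List.getElem?_cons_zero, Nat.add_zero]
      rw [List.getElem?_append_right (by omega)]
      simp [List.take_left']
    | succ q =>
      have := ih (pre ++ [b]) q (by simpa using hq)
      simp only [nhrRef, List.getElem?_cons_succ]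
      rw [this]
      congr 2
      · simp
      · simp [List.length_append]; omega

-- ---- B side ----

-- positions of base b in bases, with offset
def nhrPos (b : String) : List String → Nat → List Nat
  | [], _ => []
  | x :: xs, m => if x = b then m :: nhrPos b xs (m + 1) else nhrPos b xs (m + 1)

lemma nhrPos_cons_pos (b x : String) (xs : List String) (m : Nat) (hx : x = b) :
    nhrPos b (x :: xs) m = m :: nhrPos b xs (m + 1) := by simp [nhrPos, hx]

lemma nhrPos_cons_neg (b x : String) (xs : List String) (m : Nat) (hx : ¬ x = b) :
    nhrPos b (x :: xs) m = nhrPos b xs (m + 1) := by simp [nhrPos, hx]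

lemma nhrPos_filter (b : String) (bases : List String) (m : Nat) :
    ((bases.zipIdx m).filter (fun p => p.1 == b)).map Prod.snd = nhrPos b bases m := by
  induction bases generalizing m with
  | nil => rfl
  | cons x xs ih =>
    by_cases hx : x = b <;>
      simp [List.zipIdx_cons, nhrPos, hx, ih]

lemma nhrGroups_getD (bases : List String) (b : String) :
    (nhrGroups bases).getD b [] = nhrPos b bases 0 := by
  unfold nhrGroups
  rw [PySem.Dict.getD_foldl_modify_append]
  simpa using nhrPos_filter b bases 0

lemma nhrPos_rank (b : String) (bases : List String) (m r i : Nat)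
    (h : (nhrPos b bases m)[r]? = some i) :
    m ≤ i ∧ i - m < bases.length ∧ bases[i - m]? = some b ∧ (bases.take (i - m)).count b = r := by
  induction bases generalizing m r i with
  | nil => simp [nhrPos] at h
  | cons x xs ih =>
    by_cases hx : x = b
    · rw [nhrPos_cons_pos b x xs m hx] at h
      cases r with
      | zero =>
        rw [List.getElem?_cons_zero] at h
        obtain rfl : m = i := by injection h
        simp [hx]
      | succ r =>
        rw [List.getElem?_cons_succ] at h
        obtain ⟨h1, h2, h3, h4⟩ := ih (m + 1) r i h
        have hi : i - m = (i - (m + 1)) + 1 := by omega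
        refine ⟨by omega, by simp; omega, ?_, ?_⟩
        · rw [hi, List.getElem?_cons_succ]; exact h3
        · rw [hi, List.take_succ_cons]
          subst hx
          rw [List.count_cons_self, h4]
    · rw [nhrPos_cons_neg b x xs m hx] at h
      obtain ⟨h1, h2, h3, h4⟩ := ih (m + 1) r i h
      have hi : i - m = (i - (m + 1)) + 1 := by omega
      refine ⟨by omega, by simp; omega, ?_, ?_⟩
      · rw [hi, List.getElem?_cons_succ]; exact h3
      · rw [hi, List.take_succ_cons, List.count_cons_of_ne hx, h4]

lemma nhrPos_complete (b : String) (bases : List String) (m i : Nat)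
    (h : bases[i]? = some b) :
    (nhrPos b bases m)[(bases.take i).count b]? = some (m + i) := by
  induction bases generalizing m i with
  | nil => simp at h
  | cons x xs ih =>
    cases i with
    | zero =>
      rw [List.getElem?_cons_zero] at h
      obtain rfl : x = b := by injection h
      simp [nhrPos]
    | succ i =>
      rw [List.getElem?_cons_succ] at h
      by_cases hx : x = b
      · rw [nhrPos_cons_pos b x xs m hx, List.take_succ_cons]
        subst hx
        rw [List.count_cons_self, List.getElem?_cons_succ, ih (m + 1) i h]
        congr 1
        omega
      · rw [nhrPos_cons_neg b x xs m hx, List.take_succ_cons,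
            List.count_cons_of_ne hx, ih (m + 1) i h]
        congr 1
        omega

lemma nhrPos_ge (b : String) (bases : List String) (m : Nat) :
    ∀ i ∈ nhrPos b bases m, m ≤ i := by
  induction bases generalizing m with
  | nil => simp [nhrPos]
  | cons x xs ih =>
    intro i hi
    by_cases hx : x = b
    · rw [nhrPos_cons_pos b x xs m hx] at hi
      rcases List.mem_cons.1 hi with h | h
      · omega
      · have := ih (m + 1) i h; omega
    · rw [nhrPos_cons_neg b x xs m hx] at hi
      have := ih (m + 1) i hi; omega

lemma nhrPos_nodup (b : String) (bases : List String) (m : Nat) :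
    (nhrPos b bases m).Nodup := by
  induction bases generalizing m with
  | nil => simp [nhrPos]
  | cons x xs ih =>
    by_cases hx : x = b
    · rw [nhrPos_cons_pos b x xs m hx]
      refine List.nodup_cons.2 ⟨fun hmem => ?_, ih (m + 1)⟩
      have := nhrPos_ge b xs (m + 1) m hmem; omega
    · rw [nhrPos_cons_neg b x xs m hx]
      exact ih (m + 1)

lemma nhrPos_mem_base (b : String) (bases : List String) (i : Nat)
    (h : i ∈ nhrPos b bases 0) : bases[i]? = some b := by
  obtain ⟨r, hr⟩ := List.mem_iff_getElem?.1 h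
  obtain ⟨_, _, h3, _⟩ := nhrPos_rank b bases 0 r i hr
  simpa using h3

-- the write loop of one group, length and pointwise content
lemma foldl_set_length (ps : List (Nat × Nat)) (f : Nat → String) (o0 : List String) :
    (ps.foldl (fun o p => o.set p.1 (f p.2)) o0).length = o0.length := by
  induction ps generalizing o0 with
  | nil => rfl
  | cons p ps ih => simp [List.foldl_cons, ih]

lemma foldl_set_get (ps : List (Nat × Nat)) (f : Nat → String) :
    ∀ (o0 : List String) (q : Nat), (ps.map Prod.fst).Nodup →
    (ps.foldl (fun o p => o.set p.1 (f p.2)) o0)[q]? =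
      match ps.find? (fun p => p.1 == q) with
      | some p => if q < o0.length then some (f p.2) else none
      | none => o0[q]? := by
  induction ps with
  | nil => intro o0 q _; simp
  | cons p ps ih =>
    intro o0 q hnd
    rw [List.map_cons, List.nodup_cons] at hnd
    obtain ⟨hp, hnd'⟩ := hnd
    rw [List.foldl_cons, ih _ _ hnd']
    by_cases hq : p.1 = q
    · subst hq
      rw [List.find?_cons_of_pos (by simp)]
      have hnone : ps.find? (fun r => r.1 == p.1) = none := by
        rw [List.find?_eq_none]
        intro r hr
        simp only [beq_iff_eq]
        intro he
        exact hp (by rw [← he]; exact List.mem_map.2 ⟨r, hr, rfl⟩)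
      rw [hnone]
      by_cases hlt : p.1 < o0.length
      · rw [List.getElem?_set_self hlt]; simp [hlt]
      · rw [List.getElem?_eq_none (by rw [List.length_set]; omega)]; simp [hlt]
    · rw [List.find?_cons_of_neg (by simp [hq])]
      cases hfind : ps.find? (fun r => r.1 == q) with
      | some r => simp [List.length_set]
      | none => simp [List.getElem?_set_ne hq]

lemma find?_zipIdx (rest : List Nat) (m c q : Nat) (hnd : rest.Nodup)
    (h : rest[c]? = some q) :
    (rest.zipIdx m).find? (fun p => p.1 == q) = some (q, m + c) := by
  induction rest generalizing m c with
  | nil => simp at h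
  | cons x xs ih =>
    rw [List.nodup_cons] at hnd
    cases c with
    | zero =>
      rw [List.getElem?_cons_zero] at h
      obtain rfl : x = q := by injection h
      rw [List.zipIdx_cons, List.find?_cons_of_pos (by simp)]
      simp
    | succ c =>
      rw [List.getElem?_cons_succ] at h
      have hx : x ≠ q := fun he => hnd.1 (he ▸ List.mem_of_getElem? h)
      rw [List.zipIdx_cons, List.find?_cons_of_neg (by simp [hx]),
          ih (m + 1) c hnd.2 h]
      have : m + 1 + c = m + (c + 1) := by omega
      rw [this]

lemma nhrFill_length (base : String) (out : List String) (idxs : List Nat) :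
    (nhrFill base out idxs).length = out.length := by
  cases idxs with
  | nil => rfl
  | cons i0 rest =>
    have h := foldl_set_length (rest.zipIdx 2)
      (fun j : Nat => base ++ "_" ++ PySem.Int.toStr (j : Int)) (out.set i0 base)
    simpa [nhrFill] using h

-- effect of one group fill
lemma nhrFill_get (bases : List String) (b : String) (out : List String)
    (hlen : out.length = bases.length) (q : Nat) :
    (nhrFill b out (nhrPos b bases 0))[q]? =
      if bases[q]? = some b then some (nhrName bases q) else out[q]? := by
  cases hpos : nhrPos b bases 0 with
  | nil =>
    have hnb : ¬ bases[q]? = some b := by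
      intro hb
      have := nhrPos_complete b bases 0 q hb
      rw [hpos] at this; simp at this
    simp [nhrFill, hnb]
  | cons i0 rest =>
    have hnodup : (i0 :: rest).Nodup := hpos ▸ nhrPos_nodup b bases 0
    have hrank0 := nhrPos_rank b bases 0 0 i0 (by rw [hpos]; rfl)
    have hi0b : bases[i0]? = some b := by simpa using hrank0.2.2.1
    have hi0c : (bases.take i0).count b = 0 := by simpa using hrank0.2.2.2
    have hi0lt : i0 < bases.length := by have := hrank0.2.1; omega
    have hfs := foldl_set_get (rest.zipIdx 2)
      (fun j : Nat => b ++ "_" ++ PySem.Int.toStr (j : Int)) (out.set i0 b) q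
      (by rw [List.zipIdx_map_fst]; exact (List.nodup_cons.1 hnodup).2)
    show (List.foldl _ _ _)[q]? = _
    refine hfs.trans ?_
    by_cases hb : bases[q]? = some b
    · have hc := nhrPos_complete b bases 0 q hb
      rw [hpos] at hc
      simp only [Nat.zero_add] at hc
      have hqlt : q < bases.length := (List.getElem?_eq_some_iff.1 hb).1
      cases hcc : (bases.take q).count b with
      | zero =>
        rw [hcc] at hc
        rw [List.getElem?_cons_zero] at hc
        obtain rfl : i0 = q := by injection hc
        have hnone : (rest.zipIdx 2).find? (fun p => p.1 == i0) = none := by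
          rw [List.find?_eq_none]
          intro p hpmem
          simp only [beq_iff_eq]
          intro he
          have hpr : p.1 ∈ rest := by
            rw [← List.zipIdx_map_fst 2 rest]; exact List.mem_map.2 ⟨p, hpmem, rfl⟩
          rw [he] at hpr
          exact (List.nodup_cons.1 hnodup).1 hpr
        rw [hnone]
        have hql : i0 < out.length := by omega
        simp [hb, List.getElem?_set_self hql, nhrName, hcc]
      | succ c' =>
        rw [hcc, List.getElem?_cons_succ] at hc
        rw [find?_zipIdx rest 2 c' q (List.nodup_cons.1 hnodup).2 hc]
        have hql : q < (out.set i0 b).length := by rw [List.length_set]; omega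
        have hname : nhrName bases q = b ++ "_" ++ PySem.Int.toStr ((2 + c' : Nat) : Int) := by
          simp only [nhrName, hb, hcc]
          rw [if_neg (by omega)]
          congr 1
          push_cast
          ring
        simp [hb, hname, show q < out.length by omega]
    · have hq0 : q ∉ (i0 :: rest) := fun hmem =>
        hb (nhrPos_mem_base b bases q (hpos ▸ hmem))
      have hnone : (rest.zipIdx 2).find? (fun p => p.1 == q) = none := by
        rw [List.find?_eq_none]
        intro p hpmem
        simp only [beq_iff_eq]
        intro he
        have hpr : p.1 ∈ rest := by
          rw [← List.zipIdx_map_fst 2 rest]; exact List.mem_map.2 ⟨p, hpmem, rfl⟩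
        rw [he] at hpr
        exact hq0 (List.mem_cons_of_mem _ hpr)
      have hne : i0 ≠ q := by
        intro he
        apply hq0
        rw [← he]
        exact List.mem_cons_self ..
      rw [hnone, if_neg hb]
      exact List.getElem?_set_ne hne

-- the outer loop over the groups, pointwise
lemma fold_fill_get (bases : List String) (ks : List String) (out : List String)
    (hlen : out.length = bases.length) (q : Nat) :
    ((ks.map (fun k => (k, nhrPos k bases 0))).foldl
        (fun o p => nhrFill p.1 o p.2) out)[q]? =
      match bases[q]? with
      | some b => if b ∈ ks then some (nhrName bases q) else out[q]?
      | none => out[q]? := by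
  induction ks generalizing out with
  | nil => cases bases[q]? <;> simp
  | cons k ks ih =>
    rw [List.map_cons, List.foldl_cons,
        ih (nhrFill k out (nhrPos k bases 0)) (by rw [nhrFill_length, hlen]),
        nhrFill_get bases k out hlen q]
    cases hb : bases[q]? with
    | none => simp
    | some b =>
      by_cases hbk : b = k
      · subst hbk
        by_cases hmem : b ∈ ks <;> simp [hmem]
      · by_cases hmem : b ∈ ks <;> simp [hmem, hbk]

-- B's whole body equals the reference
lemma altB_eq_ref (bases : List String) :
    (nhrGroups bases).items.foldl (fun out p => nhrFill p.1 out p.2)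
        (List.replicate bases.length "") = nhrRef [] bases := by
  have hnd : (nhrGroups bases).keys.Nodup := by
    unfold nhrGroups
    exact PySem.Dict.nodup_keys_foldl_modify_key _ _ _ _ _ PySem.Dict.nodup_keys_empty
  have hitems : (nhrGroups bases).items =
      (nhrGroups bases).keys.map (fun k => (k, nhrPos k bases 0)) := by
    rw [PySem.Dict.items_eq_map_keys _ hnd []]
    exact List.map_congr_left fun k _ => by rw [nhrGroups_getD]
  have hkeys : ∀ b : String, b ∈ (nhrGroups bases).keys ↔ b ∈ bases := by
    intro b
    unfold nhrGroups
    rw [PySem.Dict.keys_foldl_modify_key]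
    rw [PySem.Dict.keys_empty, PySem.Set.update_nil_left, List.zipIdx_map_fst]
    exact PySem.Set.mem_ofList bases b
  rw [hitems]
  apply List.ext_getElem?
  intro q
  rw [fold_fill_get bases _ _ (by simp) q]
  by_cases hq : q < bases.length
  · obtain ⟨b, hb⟩ : ∃ b, bases[q]? = some b :=
      ⟨bases[q], List.getElem?_eq_some_iff.2 ⟨hq, rfl⟩⟩
    have hmem : b ∈ bases := List.mem_of_getElem? hb
    rw [hb, nhrRef_get [] bases q (by simpa using hq)]
    simp [(hkeys b).2 hmem]
  · have h1 : bases[q]? = none := List.getElem?_eq_none (by omega)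
    have h2 : (nhrRef [] bases)[q]? = none :=
      List.getElem?_eq_none (by rw [nhrRef_length]; omega)
    have h3 : (List.replicate bases.length "" : List String)[q]? = none :=
      List.getElem?_eq_none (by rw [List.length_replicate]; omega)
    simp [h1, h2, h3]

-- ===== VERDICT =====
theorem normalize_header_row_spec : Claim_equal_normalize_header_row := by
  intro values _
  unfold Spec_normalize_header_row normalize_header_row normalize_header_row_alt
  match values with
  | none => rfl
  | some vs =>
    by_cases h : vs = []
    · simp [h]
    · simp only [h, if_false]
      rw [nhrLoopA_eq_ref vs 1 [] PySem.Dict.empty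
            (by intro b; simp [PySem.Dict.getD_empty])]
      exact (altB_eq_ref (nhrBases vs 1)).symm
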